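-- pv_equiv track=rewrite | github.com/mcfx/cplib | cplib/util/minimize/__init__.py | split_operators
-- ===== SOURCE A (Python) =====
-- operators = {
--     '::', '++', '--', '(', ')', '[', ']', '{', '}', '.', '->',
--     '+', '-', '!', '~', '*', '&', '/', '%', '>>', '<<', '<', '>', '<=', '>=', '==', '!=', '^', '|',
--     '&&', '||', '?', ':', '=', '+=', '-=', '*=', '/=', '%=', '<<=', '>>=', '&=', '^=', '|=', ',',
--     ';',
-- }
--
-- def split_operators(s):
--     i = 0
--     res = []
--     while i < len(s):
--         j = i
--         while j < len(s) and s[i:j + 1] in operators: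
--             j += 1
--         res.append(s[i:j])
--         i = j
--     return res
-- ===== SOURCE B (Python) =====
-- operators = {
--     '::', '++', '--', '(', ')', '[', ']', '{', '}', '.', '->',
--     '+', '-', '!', '~', '*', '&', '/', '%', '>>', '<<', '<', '>', '<=', '>=', '==', '!=', '^', '|',
--     '&&', '||', '?', ':', '=', '+=', '-=', '*=', '/=', '%=', '<<=', '>>=', '&=', '^=', '|=', ',',
--     ';',
-- }
--
-- def split_operators(s):
--     # Longest-match-first probe (valid: the operator set is prefix-closed, max length 3).
--     res = []
--     i = 0
--     n = len(s)
--     while i < n: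
--         for L in (3, 2, 1):
--             tok = s[i:i+L]
--             if tok in operators:
--                 res.append(tok)
--                 i += L
--                 break
--         else:
--             # non-operator character: emit it as its own token (A never returns here)
--             res.append(s[i])
--             i += 1
--     return res
-- ===== Notes on version B (the rewrite author's own statement) =====
-- stated objective: alternative
-- what changed: Replaces A's incremental extend-while inner scan (grow j while s[i:j+1] is an operator) with a descending longest-match probe that tries slice lengths 3, 2, 1 directly, valid because the operator set is prefix-closed with maximum length 3; Pre_ excludes strings containing a non-operator character, on which A loops forever (appends '' without advancing i) while B tokenizes the character and returns.
import Mathlib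
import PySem

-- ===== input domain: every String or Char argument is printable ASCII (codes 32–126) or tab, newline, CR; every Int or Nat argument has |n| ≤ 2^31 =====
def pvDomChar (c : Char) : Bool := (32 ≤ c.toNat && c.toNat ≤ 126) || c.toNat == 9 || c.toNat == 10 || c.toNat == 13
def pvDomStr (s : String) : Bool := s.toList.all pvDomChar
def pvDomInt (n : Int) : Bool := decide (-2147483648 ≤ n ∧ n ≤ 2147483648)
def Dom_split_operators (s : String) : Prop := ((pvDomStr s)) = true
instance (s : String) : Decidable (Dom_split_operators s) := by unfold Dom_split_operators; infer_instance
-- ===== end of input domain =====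

-- B replaces A's incremental extend-while inner loop by a descending longest-match probe
-- (try slice lengths 3, 2, 1), valid because the operator set is prefix-closed with max
-- length 3; objective: alternative decomposition, same cost.

-- the module-level constant `operators` (a Python set of string literals)
def pvOps : List String :=
  ["::", "++", "--", "(", ")", "[", "]", "{", "}", ".", "->",
   "+", "-", "!", "~", "*", "&", "/", "%", ">>", "<<", "<", ">", "<=", ">=", "==", "!=", "^", "|",
   "&&", "||", "?", ":", "=", "+=", "-=", "*=", "/=", "%=", "<<=", ">>=", "&=", "^=", "|=", ",",
   ";"]

-- ===== PORT A =====
-- s[i:j]  (0 ≤ i ≤ j ≤ len, the only slice shape A uses)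
def pvSlice (cs : List Char) (i j : Nat) : String := String.ofList ((cs.drop i).take (j - i))

-- inner `while j < len(s) and s[i:j+1] in operators: j += 1` starting at j
def pvExtend (cs : List Char) (i j : Nat) : Nat :=
  if h : j < cs.length ∧ pvSlice cs i (j + 1) ∈ pvOps then pvExtend cs i (j + 1) else j
termination_by cs.length - j
decreasing_by omega

-- outer `while i < len(s)` loop; fuel bounds the iteration count (the Python loop does
-- not terminate on strings containing a non-operator character, see Pre_ below)
def pvLoopA (cs : List Char) : Nat → Nat → List String → List String
  | 0, _, res => res
  | fuel + 1, i, res =>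
    if i < cs.length then
      pvLoopA cs fuel (pvExtend cs i i) (res ++ [pvSlice cs i (pvExtend cs i i)])
    else res

def split_operators (s : String) : List String := pvLoopA s.toList s.toList.length 0 []

-- ===== PORT B =====
-- s[i:i+L]
def pvTake (cs : List Char) (i L : Nat) : String := String.ofList ((cs.drop i).take L)

-- `while i < n: for L in (3, 2, 1): … break / else: append s[i]; i += 1`
def pvLoopB (cs : List Char) (i : Nat) (res : List String) : List String :=
  if _h : i < cs.length then
    if pvTake cs i 3 ∈ pvOps then pvLoopB cs (i + 3) (res ++ [pvTake cs i 3])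
    else if pvTake cs i 2 ∈ pvOps then pvLoopB cs (i + 2) (res ++ [pvTake cs i 2])
    else if pvTake cs i 1 ∈ pvOps then pvLoopB cs (i + 1) (res ++ [pvTake cs i 1])
    else pvLoopB cs (i + 1) (res ++ [pvTake cs i 1])  -- fallback: s[i] = s[i:i+1] here
  else res
termination_by cs.length - i
decreasing_by all_goals omega

def split_operators_alt (s : String) : List String := pvLoopB s.toList 0 []

-- ===== PRECONDITION & SPEC =====
-- Pre_ excludes exactly the strings containing a character that is not itself an operator:
-- on those the Python A loops forever (appends '' without advancing i) and never returns.
def pvOpChars : List Char :=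
  [':', '+', '-', '(', ')', '[', ']', '{', '}', '.', '!', '~', '*', '&', '/', '%', '<', '>', '=', '^', '|', '?', ',', ';']
def Pre_split_operators (s : String) : Prop := (s.toList.all (fun c => pvOpChars.contains c)) = true
instance (s : String) : Decidable (Pre_split_operators s) := by unfold Pre_split_operators; infer_instance

def pvWitness_split_operators : String := "::+<<="

def Spec_split_operators (s : String) (out : List String) : Prop := out = split_operators_alt s
instance (s : String) (out : List String) : Decidable (Spec_split_operators s out) := by unfold Spec_split_operators; infer_instance

-- ===== CLAIM (what is proved, stated in full; the proofs are below) =====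
def Claim_equal_split_operators : Prop := ∀ (s : String), Dom_split_operators s → Pre_split_operators s → Spec_split_operators s (split_operators s)

-- ===== LEMMAS AND PROOFS =====

-- each single character of the operator alphabet is itself an operator
theorem opchars_contains : (pvOpChars.all (fun c => pvOps.contains (String.ofList [c]))) = true := by decide

theorem opchars_ops : ∀ c ∈ pvOpChars, String.ofList [c] ∈ pvOps := by
  intro c hc
  have h := List.all_eq_true.mp opchars_contains c hc
  simpa using h

-- every operator has length ≤ 3
theorem ops_len_le : ∀ x ∈ pvOps, x.length ≤ 3 := by decide

-- the length-2 prefix of every length-3 operator is an operator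
theorem ops_prefix2 : ∀ x ∈ pvOps, x.length = 3 → String.ofList (x.toList.take 2) ∈ pvOps := by decide

theorem pvExtend_step {cs : List Char} {i j : Nat} (h : j < cs.length)
    (hm : pvSlice cs i (j + 1) ∈ pvOps) : pvExtend cs i j = pvExtend cs i (j + 1) := by
  rw [pvExtend]; simp [h, hm]

theorem pvExtend_stop {cs : List Char} {i j : Nat}
    (h : ¬(j < cs.length ∧ pvSlice cs i (j + 1) ∈ pvOps)) : pvExtend cs i j = j := by
  rw [pvExtend]; simp only [dif_neg h]

theorem pvLoopB_done {cs : List Char} {i : Nat} {res : List String} (h : ¬ i < cs.length) :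
    pvLoopB cs i res = res := by
  rw [pvLoopB]; simp only [dif_neg h]

theorem pvLoopA_done {cs : List Char} (fuel : Nat) {i : Nat} {res : List String}
    (h : ¬ i < cs.length) : pvLoopA cs fuel i res = res := by
  cases fuel <;> simp [pvLoopA, h]

theorem pvSlice_take (cs : List Char) (i m : Nat) : pvSlice cs i (i + m) = pvTake cs i m := by
  simp [pvSlice, pvTake]

theorem split_operators_loop_eq
    (cs : List Char) (hpre : ∀ c ∈ cs, String.ofList [c] ∈ pvOps) :
    ∀ fuel i res, cs.length - i ≤ fuel → pvLoopA cs fuel i res = pvLoopB cs i res := by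
  intro fuel
  induction fuel with
  | zero =>
    intro i res hle
    have hi : ¬ i < cs.length := by omega
    rw [pvLoopA_done 0 hi, pvLoopB_done hi]
  | succ fuel ih =>
    intro i res hle
    by_cases hi : i < cs.length
    · have hlen : (cs.drop i).length = cs.length - i := by simp
      have hP1 : pvTake cs i 1 ∈ pvOps := by
        have hd : cs.drop i = cs[i] :: cs.drop (i + 1) := List.drop_eq_getElem_cons hi
        have : pvTake cs i 1 = String.ofList [cs[i]] := by
          unfold pvTake; rw [hd]; rfl
        rw [this]; exact hpre _ (List.getElem_mem hi)
      have hA : pvLoopA cs (fuel + 1) i res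
          = pvLoopA cs fuel (pvExtend cs i i) (res ++ [pvSlice cs i (pvExtend cs i i)]) := by
        simp [pvLoopA, hi]
      have e0 : pvExtend cs i i = pvExtend cs i (i + 1) :=
        pvExtend_step hi (by rw [show i + 1 = i + 1 from rfl, pvSlice_take cs i 1]; exact hP1)
      by_cases h1 : i + 1 < cs.length
      · by_cases h2 : i + 2 < cs.length
        · -- at least 3 characters remain
          by_cases hP3 : pvTake cs i 3 ∈ pvOps
          · have ht3 : ((cs.drop i).take 3).length = 3 := by
              simp; omega
            have hP2 : pvTake cs i 2 ∈ pvOps := by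
              have := ops_prefix2 _ hP3 (by simp [pvTake]; omega)
              simpa [pvTake, List.take_take] using this
            have e1 : pvExtend cs i (i + 1) = pvExtend cs i (i + 2) :=
              pvExtend_step h1 (by rw [show i + 1 + 1 = i + 2 from rfl, pvSlice_take cs i 2]; exact hP2)
            have e2 : pvExtend cs i (i + 2) = pvExtend cs i (i + 3) :=
              pvExtend_step h2 (by rw [show i + 2 + 1 = i + 3 from rfl, pvSlice_take cs i 3]; exact hP3)
            have e3 : pvExtend cs i (i + 3) = i + 3 := by
              apply pvExtend_stop
              rintro ⟨h4, hm⟩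
              have hlen4 : (pvSlice cs i (i + 3 + 1)).length = 4 := by
                simp [pvSlice]; omega
              have := ops_len_le _ hm
              omega
            have hj : pvExtend cs i i = i + 3 := by rw [e0, e1, e2, e3]
            rw [hA, hj, pvSlice_take]
            rw [pvLoopB]; simp only [dif_pos hi, if_pos hP3]
            exact ih (i + 3) _ (by omega)
          · by_cases hP2 : pvTake cs i 2 ∈ pvOps
            · have e1 : pvExtend cs i (i + 1) = pvExtend cs i (i + 2) :=
                pvExtend_step h1 (by rw [show i + 1 + 1 = i + 2 from rfl, pvSlice_take cs i 2]; exact hP2)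
              have e2 : pvExtend cs i (i + 2) = i + 2 := by
                apply pvExtend_stop
                rintro ⟨_, hm⟩
                rw [show i + 2 + 1 = i + 3 from rfl, pvSlice_take cs i 3] at hm
                exact hP3 hm
              have hj : pvExtend cs i i = i + 2 := by rw [e0, e1, e2]
              rw [hA, hj, pvSlice_take]
              rw [pvLoopB]; simp only [dif_pos hi, if_neg hP3, if_pos hP2]
              exact ih (i + 2) _ (by omega)
            · have e1 : pvExtend cs i (i + 1) = i + 1 := by
                apply pvExtend_stop
                rintro ⟨_, hm⟩
                rw [show i + 1 + 1 = i + 2 from rfl, pvSlice_take cs i 2] at hm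
                exact hP2 hm
              have hj : pvExtend cs i i = i + 1 := by rw [e0, e1]
              rw [hA, hj, pvSlice_take]
              rw [pvLoopB]; simp only [dif_pos hi, if_neg hP3, if_neg hP2, if_pos hP1]
              exact ih (i + 1) _ (by omega)
        · -- exactly 2 characters remain
          have hn : cs.length = i + 2 := by omega
          have h32 : pvTake cs i 3 = pvTake cs i 2 := by
            unfold pvTake
            rw [List.take_of_length_le (by omega), List.take_of_length_le (by omega)]
          by_cases hP2 : pvTake cs i 2 ∈ pvOps
          · have hP3 : pvTake cs i 3 ∈ pvOps := by rw [h32]; exact hP2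
            have e1 : pvExtend cs i (i + 1) = pvExtend cs i (i + 2) :=
              pvExtend_step h1 (by rw [show i + 1 + 1 = i + 2 from rfl, pvSlice_take cs i 2]; exact hP2)
            have e2 : pvExtend cs i (i + 2) = i + 2 :=
              pvExtend_stop (by omega)
            have hj : pvExtend cs i i = i + 2 := by rw [e0, e1, e2]
            rw [hA, hj, pvSlice_take]
            rw [pvLoopB]; simp only [dif_pos hi, if_pos hP3]
            rw [pvLoopA_done fuel (by omega), pvLoopB_done (by omega), h32]
          · have hP3 : ¬ pvTake cs i 3 ∈ pvOps := by rw [h32]; exact hP2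
            have e1 : pvExtend cs i (i + 1) = i + 1 := by
              apply pvExtend_stop
              rintro ⟨_, hm⟩
              rw [show i + 1 + 1 = i + 2 from rfl, pvSlice_take cs i 2] at hm
              exact hP2 hm
            have hj : pvExtend cs i i = i + 1 := by rw [e0, e1]
            rw [hA, hj, pvSlice_take]
            rw [pvLoopB]; simp only [dif_pos hi, if_neg hP3, if_neg hP2, if_pos hP1]
            exact ih (i + 1) _ (by omega)
      · -- exactly 1 character remains
        have hn : cs.length = i + 1 := by omega
        have h31 : pvTake cs i 3 = pvTake cs i 1 := by
          unfold pvTake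
          rw [List.take_of_length_le (by omega), List.take_of_length_le (by omega)]
        have hP3 : pvTake cs i 3 ∈ pvOps := by rw [h31]; exact hP1
        have e1 : pvExtend cs i (i + 1) = i + 1 := pvExtend_stop (by omega)
        have hj : pvExtend cs i i = i + 1 := by rw [e0, e1]
        rw [hA, hj, pvSlice_take]
        rw [pvLoopB]; simp only [dif_pos hi, if_pos hP3]
        rw [pvLoopA_done fuel (by omega), pvLoopB_done (by omega), h31]
    · rw [pvLoopA_done (fuel + 1) hi, pvLoopB_done hi]

-- ===== VERDICT (by name: the statement is the Claim_ definition above) =====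
theorem split_operators_spec : Claim_equal_split_operators := by
  intro s _ hpre
  unfold Spec_split_operators split_operators split_operators_alt
  refine split_operators_loop_eq s.toList (fun c hc => opchars_ops c ?_) _ 0 [] (by omega)
  have := List.all_eq_true.mp hpre c hc
  simpa using this
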